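-- pv_equiv track=rewrite | github.com/goldshakil/Coding_Interview_Preparation | Python Basic/hanoi_tower.py | zero_printer
-- ===== SOURCE A (Python) =====
-- def zero_printer(original_array):
--     temp_array=list(original_array)
--     list_zero=[0]
--     i=len(temp_array)
--     while(i<3):
--         temp_array.extend(list_zero)
--         i+=1
--     return temp_array
-- ===== SOURCE B (Python) =====
-- def zero_printer(original_array):
--     # Recursive front-to-back construction: walk the input while counting down
--     # from 3, emitting each element; once the input is exhausted with budget
--     # left, emit zeros until the countdown reaches 0; then append the rest.
--     def pad(xs, k):
--         if k <= 0:
--             return list(xs)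
--         if xs:
--             return [xs[0]] + pad(xs[1:], k - 1)
--         return [0] + pad(xs, k - 1)
--     return pad(original_array, 3)
-- ===== Notes on version B (the rewrite author's own statement) =====
-- stated objective: alternative
-- what changed: Replaces A's end-appending while-loop with a structural recursion that rebuilds the list front-to-back against a countdown of 3, emitting zeros once the input is exhausted.
import Mathlib
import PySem

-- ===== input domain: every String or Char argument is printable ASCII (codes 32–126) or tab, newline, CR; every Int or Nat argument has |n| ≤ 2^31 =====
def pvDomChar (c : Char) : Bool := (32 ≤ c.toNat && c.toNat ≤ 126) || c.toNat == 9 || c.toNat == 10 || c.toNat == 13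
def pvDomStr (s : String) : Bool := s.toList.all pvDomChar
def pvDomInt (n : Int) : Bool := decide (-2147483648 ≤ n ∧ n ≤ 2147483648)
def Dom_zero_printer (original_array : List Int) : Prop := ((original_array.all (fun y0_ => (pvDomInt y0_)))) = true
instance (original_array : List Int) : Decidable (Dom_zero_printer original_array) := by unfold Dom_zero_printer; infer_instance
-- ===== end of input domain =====

-- B rebuilds the list front-to-back by structural recursion with a countdown of 3 (alternative decomposition); return-value equivalence.


-- ===== PORT A =====
-- while(i<3): temp_array.extend([0]); i+=1  — literal loop on the counter i
def zeroLoop (temp_array : List Int) (i : Int) : List Int :=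
  if i < 3 then zeroLoop (temp_array ++ [0]) (i + 1) else temp_array
  termination_by (3 - i).toNat
  decreasing_by omega

def zero_printer (original_array : List Int) : List Int :=
  zeroLoop original_array (original_array.length : Int)

-- ===== PORT B =====
-- pad(xs, k): countdown recursion emitting elements front-to-back, then zeros
def padTo (xs : List Int) (k : Int) : List Int :=
  if k ≤ 0 then xs
  else
    match xs with
    | x :: rest => x :: padTo rest (k - 1)
    | [] => 0 :: padTo [] (k - 1)
  termination_by k.toNat
  decreasing_by all_goals omega

def zero_printer_alt (original_array : List Int) : List Int :=
  padTo original_array 3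

-- ===== PRECONDITION & SPEC =====
def Spec_zero_printer (original_array : List Int) (out : List Int) : Prop := out = zero_printer_alt original_array
instance (original_array : List Int) (out : List Int) : Decidable (Spec_zero_printer original_array out) := by unfold Spec_zero_printer; infer_instance

-- ===== CLAIM (what is proved, stated in full; the proofs are below) =====
def Claim_equal_zero_printer : Prop := ∀ (original_array : List Int), Dom_zero_printer original_array → Spec_zero_printer original_array (zero_printer original_array)

-- ===== LEMMAS AND PROOFS =====
theorem zeroLoop_eq (temp_array : List Int) (i : Int) :
    zeroLoop temp_array i = temp_array ++ List.replicate (max 0 (3 - i)).toNat 0 := by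
  by_cases h : i < 3
  · rw [zeroLoop, if_pos h, zeroLoop_eq (temp_array ++ [0]) (i + 1)]
    have : (max 0 (3 - i)).toNat = (max 0 (3 - (i + 1))).toNat + 1 := by omega
    simp [this, List.replicate_succ, List.append_assoc]
  · rw [zeroLoop, if_neg h]
    have : (max 0 (3 - i)).toNat = 0 := by omega
    simp [this]
  termination_by (3 - i).toNat
  decreasing_by omega

theorem padTo_nil (k : Int) :
    padTo [] k = List.replicate (max 0 k).toNat 0 := by
  by_cases h : k ≤ 0
  · rw [padTo.eq_def, if_pos h]
    have : (max 0 k).toNat = 0 := by omega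
    simp [this]
  · rw [padTo.eq_def, if_neg h]
    simp only
    rw [padTo_nil (k - 1)]
    have : (max 0 k).toNat = (max 0 (k - 1)).toNat + 1 := by omega
    simp [this, List.replicate_succ]
  termination_by k.toNat
  decreasing_by omega

theorem padTo_eq (xs : List Int) (k : Int) :
    padTo xs k = xs ++ List.replicate (max 0 (k - (xs.length : Int))).toNat 0 := by
  induction xs generalizing k with
  | nil =>
      rw [padTo_nil]
      simp
  | cons x rest ih =>
      by_cases h : k ≤ 0
      · rw [padTo.eq_def, if_pos h]
        have h0 : (max 0 (k - ((x :: rest).length : Int))).toNat = 0 := by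
          have := Int.natCast_nonneg rest.length
          simp only [List.length_cons]
          push_cast
          omega
        rw [h0]
        simp
      · rw [padTo.eq_def, if_neg h]
        simp only
        rw [ih (k - 1)]
        have : (max 0 ((k - 1) - (rest.length : Int))).toNat
             = (max 0 (k - ((x :: rest).length : Int))).toNat := by simp; omega
        simp [this]

-- ===== VERDICT (by name: the statement is the Claim_ definition above) =====
theorem zero_printer_spec : Claim_equal_zero_printer := by
  intro arr _
  show zero_printer arr = zero_printer_alt arr
  rw [zero_printer, zeroLoop_eq, zero_printer_alt, padTo_eq]
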